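-- pv_equiv track=rewrite | github.com/dacianf/University_Projects | 1st_year/Programming Fundamentals/test_01_02_19/auxx/auxFunc.py | strgValToTable
-- ===== SOURCE A (Python) =====
-- def strgValToTable(strg):
--     '''
--         Returns an object with parameters from strg
--         Input: - strg - string containing object's parameters
--                - Object - object name
--         Output: -  - new object with strg parameters
--     '''
--     patternn = [[' ' for x in range(8)] for y in range(8)]
--     if len(strg) == 0:
--         return patternn
--     strg = strg.strip().split(".")
--     x = len(strg)
--     for sq in strg[:x-1]:
--         patternn[int(sq[1])][int(sq[3])] = 'x'
--     return patternn
-- ===== SOURCE B (Python) =====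
-- def strgValToTable(strg):
--     marks = {(int(sq[1]), int(sq[3])) for sq in strg.strip().split(".")[:-1]}
--     return [['x' if (y, x) in marks else ' ' for x in range(8)] for y in range(8)]
-- ===== Notes on version B (the rewrite author's own statement) =====
-- stated objective: simpler
-- what changed: Instead of allocating a blank 8x8 grid and mutating cells token by token, B first collects the marked coordinates into a set and then builds the whole grid in one nested comprehension by membership test; the empty-string special case disappears because ''.strip().split('.')[:-1] is empty.
import Mathlib
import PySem

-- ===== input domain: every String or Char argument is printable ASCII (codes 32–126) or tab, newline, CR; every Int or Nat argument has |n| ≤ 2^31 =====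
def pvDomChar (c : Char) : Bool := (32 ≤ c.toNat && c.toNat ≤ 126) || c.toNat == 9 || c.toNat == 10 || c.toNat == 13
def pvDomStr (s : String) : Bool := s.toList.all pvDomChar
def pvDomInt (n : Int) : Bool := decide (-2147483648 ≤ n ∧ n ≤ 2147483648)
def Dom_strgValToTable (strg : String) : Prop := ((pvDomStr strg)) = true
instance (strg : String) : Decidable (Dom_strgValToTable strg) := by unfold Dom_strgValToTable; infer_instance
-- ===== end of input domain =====

-- B replaces A's blank-grid-then-mutate loop by collecting the marked coordinates in a set
-- and building the whole grid with a membership-tested nested comprehension (no special case for "").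

-- shared helpers: int(sq[1]) and int(sq[3]) (both Pythons compute exactly these);
-- the .getD defaults are unreachable under Pre_ (pyGet? / ofChars? return some there)
def pvR (sq : String) : Int := (PySem.Int.ofChars? [(PySem.Str.pyGet? sq 1).getD ' ']).getD 0
def pvC (sq : String) : Int := (PySem.Int.ofChars? [(PySem.Str.pyGet? sq 3).getD ' ']).getD 0

-- ===== PORT A =====
def strgValToTable (strg : String) : List (List String) :=
  let patternn : List (List String) :=
    (PySem.List.pyRange 0 8 1).map (fun _ => (PySem.List.pyRange 0 8 1).map (fun _ => " "))
  if PySem.Str.len strg = 0 then patternn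
  else
    let parts := (PySem.Str.split? (PySem.Str.strip strg) ".").getD []  -- sep "." ≠ "": split? is some
    let x : Int := parts.length
    (PySem.List.slice parts none (some (x - 1))).foldl
      (fun pat sq =>
        let r := pvR sq
        let c := pvC sq
        PySem.List.pySetD pat r (PySem.List.pySetD (PySem.List.pyGetD pat r []) c "x"))
      patternn

-- ===== PORT B =====
def strgValToTable_alt (strg : String) : List (List String) :=
  let marks : PySem.Set (Int × Int) :=
    PySem.Set.ofList
      ((PySem.List.slice ((PySem.Str.split? (PySem.Str.strip strg) ".").getD []) none (some (-1))).map
        (fun sq => (pvR sq, pvC sq)))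
  (PySem.List.pyRange 0 8 1).map (fun y =>
    (PySem.List.pyRange 0 8 1).map (fun x =>
      if PySem.Set.contains marks (y, x) then "x" else " "))

-- ===== PRECONDITION & SPEC =====
-- token sq is safe for A: sq[1] and sq[3] exist and are digits '0'..'7'
-- (otherwise Python A raises IndexError or ValueError, or indexes the 8-row grid out of range)
def pvTokOK (sq : String) : Bool :=
  match PySem.Str.pyGet? sq 1, PySem.Str.pyGet? sq 3 with
  | some c1, some c3 => ('0' ≤ c1 && c1 ≤ '7') && ('0' ≤ c3 && c3 ≤ '7')
  | _, _ => false

-- Pre_ excludes exactly the inputs where A raises: some token before the last '.' lacks a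
-- character at index 1 or 3, or that character is not a digit in 0..7.
def Pre_strgValToTable (strg : String) : Prop :=
  ∀ sq ∈ ((PySem.Str.split? (PySem.Str.strip strg) ".").getD []).dropLast, pvTokOK sq = true
instance (strg : String) : Decidable (Pre_strgValToTable strg) := by unfold Pre_strgValToTable; infer_instance

def pvWitness_strgValToTable : String := "a1b3.r0c0."

def Spec_strgValToTable (strg : String) (out : List (List String)) : Prop := out = strgValToTable_alt strg
instance (strg : String) (out : List (List String)) : Decidable (Spec_strgValToTable strg out) := by unfold Spec_strgValToTable; infer_instance

-- ===== CLAIM (what is proved, stated in full; the proofs are below) =====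
def Claim_equal_strgValToTable : Prop := ∀ (strg : String), Dom_strgValToTable strg → Pre_strgValToTable strg → Spec_strgValToTable strg (strgValToTable strg)

-- ===== LEMMAS AND PROOFS =====

-- A's fold step, abstracted over the parsed coordinate pair
def pvStep (pat : List (List String)) (p : Int × Int) : List (List String) :=
  PySem.List.pySetD pat p.1 (PySem.List.pySetD (PySem.List.pyGetD pat p.1 []) p.2 "x")

def pvBlank : List (List String) :=
  (PySem.List.pyRange 0 8 1).map (fun _ => (PySem.List.pyRange 0 8 1).map (fun _ => " "))

def pvGrid (ps : List (Int × Int)) : List (List String) :=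
  (PySem.List.pyRange 0 8 1).map (fun y =>
    (PySem.List.pyRange 0 8 1).map (fun x => if decide ((y, x) ∈ ps) then "x" else " "))

lemma pvRange8 : PySem.List.pyRange 0 8 1 = [0,1,2,3,4,5,6,7] := by decide

lemma char_eq_48 {c : Char} (h : c.toNat = 48) : c = '0' := by rw [← Char.ofNat_toNat c, h]
lemma char_eq_49 {c : Char} (h : c.toNat = 49) : c = '1' := by rw [← Char.ofNat_toNat c, h]
lemma char_eq_50 {c : Char} (h : c.toNat = 50) : c = '2' := by rw [← Char.ofNat_toNat c, h]
lemma char_eq_51 {c : Char} (h : c.toNat = 51) : c = '3' := by rw [← Char.ofNat_toNat c, h]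
lemma char_eq_52 {c : Char} (h : c.toNat = 52) : c = '4' := by rw [← Char.ofNat_toNat c, h]
lemma char_eq_53 {c : Char} (h : c.toNat = 53) : c = '5' := by rw [← Char.ofNat_toNat c, h]
lemma char_eq_54 {c : Char} (h : c.toNat = 54) : c = '6' := by rw [← Char.ofNat_toNat c, h]
lemma char_eq_55 {c : Char} (h : c.toNat = 55) : c = '7' := by rw [← Char.ofNat_toNat c, h]

lemma digit_eq (c : Char) (h1 : '0' ≤ c) (h2 : c ≤ '7') :
    c = '0' ∨ c = '1' ∨ c = '2' ∨ c = '3' ∨ c = '4' ∨ c = '5' ∨ c = '6' ∨ c = '7' := by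
  have hv1 : 48 ≤ c.toNat := h1
  have hv2 : c.toNat ≤ 55 := h2
  have hd : c.toNat = 48 ∨ c.toNat = 49 ∨ c.toNat = 50 ∨ c.toNat = 51 ∨ c.toNat = 52 ∨
      c.toNat = 53 ∨ c.toNat = 54 ∨ c.toNat = 55 := by omega
  rcases hd with h|h|h|h|h|h|h|h
  · exact Or.inl (char_eq_48 h)
  · exact Or.inr (Or.inl (char_eq_49 h))
  · exact Or.inr (Or.inr (Or.inl (char_eq_50 h)))
  · exact Or.inr (Or.inr (Or.inr (Or.inl (char_eq_51 h))))
  · exact Or.inr (Or.inr (Or.inr (Or.inr (Or.inl (char_eq_52 h)))))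
  · exact Or.inr (Or.inr (Or.inr (Or.inr (Or.inr (Or.inl (char_eq_53 h))))))
  · exact Or.inr (Or.inr (Or.inr (Or.inr (Or.inr (Or.inr (Or.inl (char_eq_54 h)))))))
  · exact Or.inr (Or.inr (Or.inr (Or.inr (Or.inr (Or.inr (Or.inr (char_eq_55 h)))))))

lemma digit_ofChars (c : Char) (h1 : '0' ≤ c) (h2 : c ≤ '7') :
    PySem.Int.ofChars? [c] = some ((c.toNat : Int) - 48) ∧
      0 ≤ (c.toNat : Int) - 48 ∧ (c.toNat : Int) - 48 < 8 := by
  rcases digit_eq c h1 h2 with h|h|h|h|h|h|h|h <;> subst h <;> refine ⟨by decide, by decide, by decide⟩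

lemma tok_bounds (sq : String) (h : pvTokOK sq = true) :
    (0 ≤ pvR sq ∧ pvR sq < 8) ∧ (0 ≤ pvC sq ∧ pvC sq < 8) := by
  unfold pvTokOK at h
  unfold pvR pvC
  simp only [PySem.Str.pyGet?] at h ⊢
  cases h1 : PySem.Chars.pyGet? sq.toList 1 with
  | none => rw [h1] at h; simp at h
  | some c1 =>
    cases h3 : PySem.Chars.pyGet? sq.toList 3 with
    | none => rw [h1, h3] at h; simp at h
    | some c3 =>
      rw [h1, h3] at h
      simp only [Bool.and_eq_true, decide_eq_true_eq] at h
      obtain ⟨⟨a1, a2⟩, b1, b2⟩ := h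
      obtain ⟨e1, l1, u1⟩ := digit_ofChars c1 a1 a2
      obtain ⟨e3, l3, u3⟩ := digit_ofChars c3 b1 b2
      simp only [Option.getD_some, e1, e3]
      omega

-- cell view of a grid
def pvCell (g : List (List String)) (y x : Nat) : String := (g.getD y []).getD x ""

lemma pvStep_shape (g : List (List String)) (p : Int × Int)
    (hg : g.length = 8) (hrow_mem : ∀ row ∈ g, row.length = 8)
    (hp : (0 ≤ p.1 ∧ p.1 < 8) ∧ (0 ≤ p.2 ∧ p.2 < 8)) :
    (pvStep g p).length = 8 ∧ (∀ row ∈ pvStep g p, row.length = 8) := by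
  obtain ⟨⟨hr0, hr8⟩, hc0, hc8⟩ := hp
  unfold pvStep
  rw [PySem.List.pySetD_of_nonneg _ _ hr0, PySem.List.pySetD_of_nonneg _ _ hc0,
    PySem.List.pyGetD_eq_getElem _ _ hr0 (by rw [hg]; exact_mod_cast hr8)]
  refine ⟨by simp [hg], ?_⟩
  intro row hrow
  rcases List.mem_or_eq_of_mem_set hrow with hmem | rfl
  · exact hrow_mem row hmem
  · rw [List.length_set]
    exact hrow_mem _ (List.mem_of_getElem rfl)

lemma getD_set {α : Type} (l : List α) (n y : Nat) (v d : α) (hn : n < l.length) :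
    (l.set n v).getD y d = if n = y then v else l.getD y d := by
  by_cases h : n = y
  · subst h; simp [List.getD_eq_getElem?_getD, hn]
  · simp [List.getD_eq_getElem?_getD, h]

lemma pvStep_cell (g : List (List String)) (p : Int × Int)
    (hg : g.length = 8) (hrow : ∀ row ∈ g, row.length = 8)
    (hp : (0 ≤ p.1 ∧ p.1 < 8) ∧ (0 ≤ p.2 ∧ p.2 < 8)) (y x : Nat) (hy : y < 8) (hx : x < 8) :
    pvCell (pvStep g p) y x = if ((y : Int), (x : Int)) = p then "x" else pvCell g y x := by
  obtain ⟨r, c⟩ := p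
  obtain ⟨⟨hr0, hr8⟩, hc0, hc8⟩ := hp
  simp only at hr0 hr8 hc0 hc8
  have hrn : r.toNat < g.length := by rw [hg]; omega
  have hrlen : g[r.toNat].length = 8 := hrow _ (List.mem_of_getElem rfl)
  have hcn : c.toNat < g[r.toNat].length := by rw [hrlen]; omega
  unfold pvStep pvCell
  simp only
  rw [PySem.List.pySetD_of_nonneg _ _ hr0, PySem.List.pySetD_of_nonneg _ _ hc0,
    PySem.List.pyGetD_eq_getElem _ _ hr0 (by rw [hg]; exact_mod_cast hr8)]
  rw [getD_set _ _ _ _ _ hrn]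
  simp only [Prod.mk.injEq]
  by_cases hyr : r.toNat = y
  · rw [if_pos hyr, getD_set _ _ _ _ _ hcn]
    have hgy : g.getD y [] = g[r.toNat] := by
      subst hyr
      simp [List.getD_eq_getElem?_getD, List.getElem?_eq_getElem hrn]
    by_cases hxc : c.toNat = x
    · rw [if_pos hxc, if_pos (by omega)]
    · rw [if_neg hxc, if_neg (by intro hcontra; omega), hgy]
  · rw [if_neg hyr, if_neg (by intro hcontra; omega)]

lemma foldl_cell (ps : List (Int × Int)) (g : List (List String))
    (hg : g.length = 8) (hrow : ∀ row ∈ g, row.length = 8)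
    (hps : ∀ p ∈ ps, (0 ≤ p.1 ∧ p.1 < 8) ∧ (0 ≤ p.2 ∧ p.2 < 8)) (y x : Nat) (hy : y < 8) (hx : x < 8) :
    pvCell (ps.foldl pvStep g) y x = if ((y : Int), (x : Int)) ∈ ps then "x" else pvCell g y x := by
  induction ps generalizing g with
  | nil => simp
  | cons p ps ih =>
    have hp := hps p (by simp)
    have hshape := pvStep_shape g p hg hrow hp
    have := ih (pvStep g p) hshape.1 hshape.2 (fun q hq => hps q (by simp [hq]))
    simp only [List.foldl_cons, this, pvStep_cell g p hg hrow hp y x hy hx, List.mem_cons]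
    by_cases hm : ((y : Int), (x : Int)) ∈ ps <;> by_cases he : ((y : Int), (x : Int)) = p <;> simp [hm, he]

lemma foldl_shape (ps : List (Int × Int)) (g : List (List String))
    (hg : g.length = 8) (hrow : ∀ row ∈ g, row.length = 8)
    (hps : ∀ p ∈ ps, (0 ≤ p.1 ∧ p.1 < 8) ∧ (0 ≤ p.2 ∧ p.2 < 8)) :
    (ps.foldl pvStep g).length = 8 ∧ ∀ row ∈ ps.foldl pvStep g, row.length = 8 := by
  induction ps generalizing g with
  | nil => exact ⟨hg, hrow⟩
  | cons p ps ih =>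
    have hshape := pvStep_shape g p hg hrow (hps p (by simp))
    exact ih (pvStep g p) hshape.1 hshape.2 (fun q hq => hps q (by simp [hq]))

lemma pvGrid_shape (ps : List (Int × Int)) :
    (pvGrid ps).length = 8 ∧ ∀ row ∈ pvGrid ps, row.length = 8 := by
  refine ⟨by simp [pvGrid, pvRange8], ?_⟩
  intro row hrow
  rw [pvGrid, List.mem_map] at hrow
  obtain ⟨y, _, rfl⟩ := hrow
  simp [pvRange8]

lemma pvGrid_cell (ps : List (Int × Int)) (y x : Nat) (hy : y < 8) (hx : x < 8) :
    pvCell (pvGrid ps) y x = if ((y : Int), (x : Int)) ∈ ps then "x" else " " := by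
  unfold pvGrid pvCell
  rw [pvRange8]
  interval_cases y <;> interval_cases x <;> simp [List.getD]

lemma cell_ext (g h : List (List String))
    (hg : g.length = 8 ∧ ∀ row ∈ g, row.length = 8)
    (hh : h.length = 8 ∧ ∀ row ∈ h, row.length = 8)
    (hc : ∀ y x : Nat, y < 8 → x < 8 → pvCell g y x = pvCell h y x) : g = h := by
  apply List.ext_getElem (by omega)
  intro y hy hy'
  apply List.ext_getElem
  · rw [hg.2 _ (List.mem_of_getElem rfl), hh.2 _ (List.mem_of_getElem rfl)]
  · intro x hx hx'
    have hx8 : x < 8 := by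
      have := hg.2 _ (List.mem_of_getElem (rfl : g[y] = g[y])); omega
    have t := hc y x (by omega) hx8
    simp only [pvCell, List.getD_eq_getElem?_getD] at t
    rw [List.getElem?_eq_getElem hy, List.getElem?_eq_getElem hy'] at t
    simp only [Option.getD_some] at t
    rw [List.getElem?_eq_getElem hx, List.getElem?_eq_getElem hx'] at t
    simpa using t

lemma main_fold (ps : List (Int × Int))
    (hps : ∀ p ∈ ps, (0 ≤ p.1 ∧ p.1 < 8) ∧ (0 ≤ p.2 ∧ p.2 < 8)) :
    ps.foldl pvStep pvBlank = pvGrid ps := by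
  have hb : pvBlank.length = 8 ∧ ∀ row ∈ pvBlank, row.length = 8 := by
    constructor
    · decide
    · intro row h; fin_cases h <;> decide
  apply cell_ext _ _ (foldl_shape ps pvBlank hb.1 hb.2 hps) (pvGrid_shape ps)
  intro y x hy hx
  rw [foldl_cell ps pvBlank hb.1 hb.2 hps y x hy hx, pvGrid_cell ps y x hy hx]
  have hb2 : pvCell pvBlank y x = " " := by interval_cases y <;> interval_cases x <;> decide
  rw [hb2]

lemma contains_ofList (ps : List (Int × Int)) (p : Int × Int) :
    PySem.Set.contains (PySem.Set.ofList ps) p = decide (p ∈ ps) := by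
  simp [PySem.Set.contains]

lemma alt_eq_grid (strg : String) :
    strgValToTable_alt strg =
      pvGrid ((PySem.List.slice ((PySem.Str.split? (PySem.Str.strip strg) ".").getD []) none
        (some (-1))).map (fun sq => (pvR sq, pvC sq))) := by
  unfold strgValToTable_alt pvGrid
  simp only [contains_ofList]

lemma len_zero_eq (s : String) (h : PySem.Str.len s = 0) : s = "" := by
  rw [PySem.Str.len_eq] at h
  have hl : s.toList = [] := by
    have : s.toList.length = 0 := by exact_mod_cast h
    simpa using this
  exact String.toList_eq_nil_iff.mp hl

lemma main_fold' (toks : List String) (h : ∀ sq ∈ toks, pvTokOK sq = true) :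
    toks.foldl (fun pat sq =>
        PySem.List.pySetD pat (pvR sq) (PySem.List.pySetD (PySem.List.pyGetD pat (pvR sq) []) (pvC sq) "x"))
      ((PySem.List.pyRange 0 8 1).map (fun _ => (PySem.List.pyRange 0 8 1).map (fun _ => " ")))
      = pvGrid (toks.map (fun sq => (pvR sq, pvC sq))) := by
  show toks.foldl (fun pat sq => pvStep pat (pvR sq, pvC sq)) pvBlank = _
  rw [← List.foldl_map (f := fun sq => (pvR sq, pvC sq)) (g := pvStep)]
  refine main_fold _ ?_
  intro p hp
  simp only [List.mem_map] at hp
  obtain ⟨sq, hsq, rfl⟩ := hp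
  exact tok_bounds sq (h sq hsq)

-- ===== VERDICT (by name: the statement is the Claim_ definition above) =====
theorem strgValToTable_spec : Claim_equal_strgValToTable := by
  intro strg _ hpre
  unfold Spec_strgValToTable
  by_cases h0 : PySem.Str.len strg = 0
  · rw [len_zero_eq strg h0]; decide
  · unfold Pre_strgValToTable at hpre
    set parts := (PySem.Str.split? (PySem.Str.strip strg) ".").getD [] with hparts
    rw [alt_eq_grid]
    unfold strgValToTable
    simp only [if_neg h0, ← hparts]
    have hslice : PySem.List.slice parts none (some ((parts.length : Int) - 1)) = parts.dropLast := by
      cases hp : parts with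
      | nil => rw [show ((([] : List String).length : Int) - 1) = -1 by simp]
               exact PySem.List.slice_to_neg_one []
      | cons a l =>
        rw [PySem.List.slice_to _ (show (0:Int) ≤ ((a :: l).length : Int) - 1 by simp),
          List.dropLast_eq_take]
        congr 1
        omega
    rw [hslice, PySem.List.slice_to_neg_one]
    exact main_fold' parts.dropLast hpre
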